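-- pv_equiv track=rewrite | github.com/wpedrak/advent_of_code | 2023/13/solution.py | find_vertical_reflection
-- ===== SOURCE A (Python) =====
-- def find_vertical_reflection(pattern: list[str]) -> int | None:
--     height = len(pattern)
--     for idx in range(1, height):
--         reflection_size = min(idx, height - idx)
--         upper = pattern[idx-reflection_size:idx]
--         lower = pattern[idx:idx+reflection_size]
--         if upper == lower[::-1]:
--             return idx
--
--     return 0
-- ===== SOURCE B (Python) =====
-- def find_vertical_reflection(pattern: list[str]) -> int | None:
--     # Manacher (even centers): compute for every boundary i the maximal mirror
--     # radius d[i] in one left-to-right sweep reusing radii inside the current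
--     # rightmost palindromic window, then return the first boundary whose radius
--     # reaches an edge.
--     h = len(pattern)
--     d = [0] * h
--     l = r = 0
--     for i in range(1, h):
--         k = min(d[l + r - i], r - i) if i < r else 0
--         while k + 1 <= i and i + k < h and pattern[i - k - 1] == pattern[i + k]:
--             k += 1
--         d[i] = k
--         if r < i + k:
--             l, r = i - k, i + k
--     for idx in range(1, h):
--         if d[idx] >= min(idx, h - idx):
--             return idx
--     return 0
-- ===== Notes on version B (the rewrite author's own statement) =====
-- stated objective: faster
-- what changed: B computes all mirror radii in one Manacher-style even-centre sweep (reusing radii inside the rightmost palindromic window) and then scans for the first boundary whose radius reaches an edge, instead of A's independent slice-build-reverse-compare at every candidate boundary.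
import Mathlib
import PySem

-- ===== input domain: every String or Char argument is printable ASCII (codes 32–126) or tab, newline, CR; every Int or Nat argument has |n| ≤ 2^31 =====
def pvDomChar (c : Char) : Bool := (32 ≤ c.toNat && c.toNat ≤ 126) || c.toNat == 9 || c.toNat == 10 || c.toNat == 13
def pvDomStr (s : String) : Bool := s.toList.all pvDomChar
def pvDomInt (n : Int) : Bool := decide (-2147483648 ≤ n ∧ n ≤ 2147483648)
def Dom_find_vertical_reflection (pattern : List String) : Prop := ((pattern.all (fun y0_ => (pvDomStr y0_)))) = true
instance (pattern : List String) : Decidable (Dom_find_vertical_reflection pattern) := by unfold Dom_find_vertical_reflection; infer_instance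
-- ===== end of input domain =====

-- B replaces A's per-boundary slice comparison by a Manacher even-centre sweep
-- computing all mirror radii in one pass, then scans for the first boundary
-- whose radius reaches an edge (alternative algorithm; same return value).

-- ===== PORT A =====
-- the 'for idx in range(1, height): … return idx' loop with early return
def pvALoop (pattern : List String) (height : Int) : List Int → Int
  | [] => 0
  | idx :: rest =>
    let reflection_size := min idx (height - idx)
    let upper := PySem.List.slice pattern (some (idx - reflection_size)) (some idx)
    let lower := PySem.List.slice pattern (some idx) (some (idx + reflection_size))
    if upper == lower.reverse then idx else pvALoop pattern height rest

def find_vertical_reflection (pattern : List String) : Int :=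
  let height : Int := pattern.length
  pvALoop pattern height (PySem.List.pyRange 1 height 1)

-- ===== PORT B =====
-- the 'while k + 1 <= i and i + k < h and pattern[i-k-1] == pattern[i+k]: k += 1'
-- loop (indices are provably nonnegative in Python, so Nat indices are exact;
-- Python's pattern[i-k-1] is written s[i-k-1]?, in range under the guards)
def pvExpand (s : List String) (h i k : Nat) : Nat :=
  if hc : k + 1 ≤ i ∧ i + k < h ∧ s[i-k-1]? = s[i+k]? then pvExpand s h i (k+1) else k
termination_by h - (i + k)
decreasing_by omega

-- the 'for i in range(1, h)' Manacher sweep; d grows by one entry per centre,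
-- so d[i] ← k becomes an append (Python preallocates d = [0]*h; entry 0 stays 0)
def pvMLoop (s : List String) (h : Nat) : List Nat → List Nat → Nat → Nat → List Nat
  | [], d, _, _ => d
  | i :: rest, d, l, r =>
    let k0 := if i < r then min (d.getD (l + r - i) 0) (r - i) else 0
    let k := pvExpand s h i k0
    let d' := d ++ [k]
    if r < i + k then pvMLoop s h rest d' (i - k) (i + k)
    else pvMLoop s h rest d' l r

-- the final 'for idx in range(1, h): if d[idx] >= min(idx, h - idx): return idx'
def pvScan (d : List Nat) (h : Nat) : List Nat → Int
  | [] => 0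
  | idx :: rest =>
    if d.getD idx 0 ≥ min idx (h - idx) then (idx : Int) else pvScan d h rest

def find_vertical_reflection_alt (pattern : List String) : Int :=
  let h := pattern.length
  let d := pvMLoop pattern h (List.range' 1 (h - 1)) [0] 0 0
  pvScan d h (List.range' 1 (h - 1))

-- ===== PRECONDITION & SPEC =====
def Spec_find_vertical_reflection (pattern : List String) (out : Int) : Prop := out = find_vertical_reflection_alt pattern
instance (pattern : List String) (out : Int) : Decidable (Spec_find_vertical_reflection pattern out) := by unfold Spec_find_vertical_reflection; infer_instance

-- ===== CLAIM (what is proved, stated in full; the proofs are below) =====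
def Claim_equal_find_vertical_reflection : Prop := ∀ (pattern : List String), Dom_find_vertical_reflection pattern → Spec_find_vertical_reflection pattern (find_vertical_reflection pattern)

-- ===== LEMMAS AND PROOFS =====

-- 'k is a valid mirror radius at boundary i'
def pvGood (s : List String) (i k : Nat) : Prop :=
  k ≤ i ∧ i + k ≤ s.length ∧ ∀ j < k, s[i-1-j]? = s[i+j]?

-- 'the radius at i can be extended past k'
def pvStep (s : List String) (i k : Nat) : Prop :=
  k + 1 ≤ i ∧ i + k < s.length ∧ s[i-k-1]? = s[i+k]?

-- 'k is THE maximal mirror radius at boundary i'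
def pvMRad (s : List String) (i k : Nat) : Prop := pvGood s i k ∧ ¬ pvStep s i k

lemma pvExpand_spec (s : List String) (i k : Nat) (hg : pvGood s i k) :
    pvMRad s i (pvExpand s s.length i k) := by
  unfold pvExpand
  split
  · next hc =>
    refine pvExpand_spec s i (k+1) ⟨hc.1, by omega, ?_⟩
    intro j hj
    rcases Nat.lt_succ_iff_lt_or_eq.mp hj with hj' | rfl
    · exact hg.2.2 j hj'
    · have e : i - j - 1 = i - 1 - j := by omega
      rw [← e]; exact hc.2.2
  · next hc => exact ⟨hg, fun hs => hc ⟨hs.1, hs.2.1, hs.2.2⟩⟩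
termination_by s.length - (i + k)
decreasing_by omega

-- mirroring a known radius through the current palindromic window is sound
lemma pvMirror (s : List String) (c kc i dm : Nat)
    (hwin : pvGood s c kc) (hmr : pvGood s (2*c - i) dm)
    (hci : c < i) (hir : i < c + kc) :
    pvGood s i (min dm (c + kc - i)) := by
  obtain ⟨hkc, hlen, hw⟩ := hwin
  obtain ⟨-, -, hm⟩ := hmr
  have h2c : i < 2*c := by omega
  refine ⟨by omega, by omega, ?_⟩
  intro j hj
  have hj1 : j < dm := lt_of_lt_of_le hj (min_le_left _ _)
  have hj2 : j < c + kc - i := lt_of_lt_of_le hj (min_le_right _ _)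
  -- step 1: s[i+j] = s[2c-1-i-j] via the window (pair around centre c)
  have t1 := hw (i + j - c) (by omega)
  have e1a : c - 1 - (i + j - c) = 2*c - 1 - i - j := by omega
  have e1b : c + (i + j - c) = i + j := by omega
  rw [e1a, e1b] at t1
  -- step 2: s[2c-i-1-j] = s[2c-i+j] via the mirrored radius
  have t2 := hm j hj1
  have e2a : 2*c - i - 1 - j = 2*c - 1 - i - j := by omega
  rw [e2a] at t2
  -- step 3: s[i-1-j] = s[2c-i+j] via the window
  have t3 : s[i-1-j]? = s[2*c - i + j]? := by
    rcases Nat.lt_or_ge (i - 1 - j) c with hlt | hge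
    · have t := hw (c - 1 - (i - 1 - j)) (by omega)
      have ea : c - 1 - (c - 1 - (i - 1 - j)) = i - 1 - j := by omega
      have eb : c + (c - 1 - (i - 1 - j)) = 2*c - i + j := by omega
      rw [ea, eb] at t
      exact t
    · have t := hw ((i - 1 - j) - c) (by omega)
      have ea : c - 1 - ((i - 1 - j) - c) = 2*c - i + j := by omega
      have eb : c + ((i - 1 - j) - c) = i - 1 - j := by omega
      rw [ea, eb] at t
      exact t.symm
  rw [t3, ← t2, ← t1]

-- the Manacher sweep computes the maximal radius at every centre
lemma pvMLoop_spec (s : List String) :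
    ∀ (n i : Nat) (d : List Nat) (l r : Nat), 1 ≤ i → i + n = s.length →
    d.length = i → (∀ c < i, pvMRad s c (d.getD c 0)) →
    (∃ c, c < i ∧ l = c - d.getD c 0 ∧ r = c + d.getD c 0) →
    ∀ c < s.length, pvMRad s c ((pvMLoop s s.length (List.range' i n) d l r).getD c 0) := by
  intro n
  induction n with
  | zero =>
    intro i d l r h1 hn hlen hrad _ c hc
    simpa [pvMLoop] using hrad c (by omega)
  | succ n ih =>
    intro i d l r h1 hn hlen hrad hwin
    rw [List.range'_succ]
    simp only [pvMLoop]
    set k0 := if i < r then min (d.getD (l + r - i) 0) (r - i) else 0 with hk0def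
    have hilen : i < s.length := by omega
    -- the initial radius is sound
    have hk0 : pvGood s i k0 := by
      rw [hk0def]
      split
      · next hir =>
        obtain ⟨c0, hc0, hl, hr⟩ := hwin
        have hm0 := hrad c0 hc0
        have hkc : d.getD c0 0 ≤ c0 := hm0.1.1
        have hlr : l + r - i = 2*c0 - i := by omega
        have hm1 := hrad (2*c0 - i) (by omega)
        have := pvMirror s c0 (d.getD c0 0) i (d.getD (2*c0 - i) 0)
          hm0.1 hm1.1 hc0 (by omega)
        rw [hlr]
        have hre : r - i = c0 + d.getD c0 0 - i := by omega
        rw [hre]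
        exact this
      · exact ⟨Nat.zero_le i, by omega, by omega⟩
    have hk := pvExpand_spec s i k0 hk0
    have hgc : ∀ c < i, (d ++ [pvExpand s s.length i k0]).getD c 0 = d.getD c 0 := by
      intro c hc
      simp [List.getD, List.getElem?_append_left (by omega : c < d.length)]
    have hgi : (d ++ [pvExpand s s.length i k0]).getD i 0 = pvExpand s s.length i k0 := by
      simp [List.getD, hlen]
    have hrad' : ∀ c < i + 1,
        pvMRad s c ((d ++ [pvExpand s s.length i k0]).getD c 0) := by
      intro c hc
      rcases Nat.lt_succ_iff_lt_or_eq.mp hc with hc' | rfl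
      · rw [hgc c hc']; exact hrad c hc'
      · rw [hgi]; exact hk
    have hlen' : (d ++ [pvExpand s s.length i k0]).length = i + 1 := by
      simp [hlen]
    split
    · next =>
      refine ih (i+1) _ _ _ (by omega) (by omega) hlen' hrad' ⟨i, by omega, ?_, ?_⟩ <;>
        rw [hgi]
    · next =>
      obtain ⟨c0, hc0, hl, hr⟩ := hwin
      exact ih (i+1) _ _ _ (by omega) (by omega) hlen' hrad'
        ⟨c0, by omega, by rw [hgc c0 hc0]; exact hl, by rw [hgc c0 hc0]; exact hr⟩

-- A's slice test, characterised pointwise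
lemma pvA_iff (pattern : List String) (i : Nat) (h1 : 1 ≤ i) (h2 : i < pattern.length) :
    ((pattern.drop (i - min i (pattern.length - i))).take (min i (pattern.length - i))
      = ((pattern.drop i).take (min i (pattern.length - i))).reverse)
    ↔ ∀ j < min i (pattern.length - i), pattern[i-1-j]? = pattern[i+j]? := by
  set n := pattern.length with hn
  set r := min i (n - i) with hr
  have hll : ((pattern.drop i).take r).length = r := by
    simp only [List.length_take, List.length_drop]; omega
  have hup : ∀ k, k < r → ((pattern.drop (i - r)).take r)[k]? = pattern[(i-r)+k]? := by
    intro k hk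
    rw [List.getElem?_take_of_lt hk, List.getElem?_drop]
  have hlo : ∀ k, k < r → (((pattern.drop i).take r).reverse)[k]? = pattern[i+(r-1-k)]? := by
    intro k hk
    rw [List.getElem?_reverse (by rw [hll]; omega), hll,
        List.getElem?_take_of_lt (by omega : r-1-k < r), List.getElem?_drop]
  constructor
  · intro heq j hj
    have h := congrArg (fun l => l[r-1-j]?) heq
    simp only at h
    rw [hup _ (by omega), hlo _ (by omega)] at h
    have e1 : (i-r)+(r-1-j) = i-1-j := by omega
    have e2 : i+(r-1-(r-1-j)) = i+j := by omega
    rw [e1, e2] at h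
    exact h
  · intro hp
    apply List.ext_getElem?
    intro k
    by_cases hk : k < r
    · rw [hup _ hk, hlo _ hk]
      have e1 : (i-r)+k = i-1-(r-1-k) := by omega
      rw [e1]
      exact hp (r-1-k) (by omega)
    · rw [List.getElem?_eq_none, List.getElem?_eq_none]
      · rw [List.length_reverse, hll]; omega
      · simp only [List.length_take, List.length_drop]; omega

-- A's PySem slice condition, characterised pointwise
lemma pvACond_iff (pattern : List String) (i : Nat) (h1 : 1 ≤ i) (h2 : i < pattern.length) :
    ((PySem.List.slice pattern (some ((i:Int) - min (i:Int) ((pattern.length:Int) - i))) (some (i:Int))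
       == (PySem.List.slice pattern (some (i:Int)) (some ((i:Int) + min (i:Int) ((pattern.length:Int) - i)))).reverse) = true)
    ↔ ∀ j < min i (pattern.length - i), pattern[i-1-j]? = pattern[i+j]? := by
  set n := pattern.length with hn
  set r := min i (n - i) with hr
  rw [PySem.List.slice_toNat _ (by omega) (by omega),
      PySem.List.slice_toNat _ (by omega) (by omega)]
  have ea : ((i:Int) - min (i:Int) ((n:Int) - i)).toNat = i - r := by omega
  have eb : ((i:Int)).toNat = i := by omega
  have ec : ((i:Int) + min (i:Int) ((n:Int) - i)).toNat = i + r := by omega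
  rw [ea, eb, ec]
  have t1 : i - (i - r) = r := by omega
  have t2 : i + r - i = r := by omega
  rw [t1, t2, beq_iff_eq]
  exact pvA_iff pattern i h1 h2

-- the maximal radius reaches the edge iff the pointwise mirror test holds
lemma pvRad_ge_iff (s : List String) (i di : Nat) (_h1 : 1 ≤ i) (h2 : i < s.length)
    (hm : pvMRad s i di) :
    (min i (s.length - i) ≤ di) ↔ ∀ j < min i (s.length - i), s[i-1-j]? = s[i+j]? := by
  constructor
  · intro hge j hj
    exact hm.1.2.2 j (by omega)
  · intro hp
    by_contra hlt
    have hlt' : di < min i (s.length - i) := by omega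
    exact hm.2 ⟨by omega, by omega,
      by have e : i - di - 1 = i - 1 - di := by omega
         rw [e]; exact hp di (by omega)⟩

-- A's search loop equals B's scan over the computed radii
lemma pvLoops_eq (pattern : List String) (d : List Nat)
    (hd : ∀ c < pattern.length, pvMRad pattern c (d.getD c 0)) :
    ∀ (n i : Nat), 1 ≤ i → i + n = pattern.length →
    pvALoop pattern (pattern.length : Int) (PySem.List.pyRange (i : Int) (pattern.length : Int) 1)
      = pvScan d pattern.length (List.range' i n) := by
  intro n
  induction n with
  | zero =>
    intro i h1 hn
    rw [PySem.List.pyRange_one_eq_nil (by omega)]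
    simp [pvALoop, pvScan]
  | succ n ih =>
    intro i h1 hn
    rw [PySem.List.pyRange_one_cons (by omega : (i:Int) < (pattern.length:Int)),
        List.range'_succ]
    simp only [pvALoop, pvScan]
    have hcond := pvACond_iff pattern i h1 (by omega)
    have hrad := pvRad_ge_iff pattern i (d.getD i 0) h1 (by omega) (hd i (by omega))
    by_cases hP : ∀ j < min i (pattern.length - i), pattern[i-1-j]? = pattern[i+j]?
    · rw [if_pos (hcond.mpr hP), if_pos (hrad.mpr hP)]
    · rw [if_neg (fun hb => hP (hcond.mp hb)), if_neg (fun hb => hP (hrad.mp hb))]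
      have := ih (i+1) (by omega) (by omega)
      simpa using this

-- ===== VERDICT (by name: the statement is the Claim_ definition above) =====
theorem find_vertical_reflection_spec : Claim_equal_find_vertical_reflection := by
  intro pattern _
  unfold Spec_find_vertical_reflection find_vertical_reflection find_vertical_reflection_alt
  by_cases h0 : pattern.length = 0
  · rw [h0]
    simp [pvALoop, pvScan, pvMLoop, PySem.List.pyRange_one_eq_nil]
  · have h1 : 1 ≤ pattern.length := by omega
    have hinit : ∀ c < (1:Nat), pvMRad pattern c (([0] : List Nat).getD c 0) := by
      intro c hc
      have hc0 : c = 0 := by omega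
      subst hc0
      show pvMRad pattern 0 0
      exact ⟨⟨le_rfl, by simp, fun j hj => absurd hj (by omega)⟩,
        fun hs => by simpa using hs.1⟩
    have hd := pvMLoop_spec pattern (pattern.length - 1) 1 [0] 0 0 le_rfl (by omega)
      rfl hinit ⟨0, by omega, rfl, rfl⟩
    exact pvLoops_eq pattern _ hd (pattern.length - 1) 1 le_rfl (by omega)
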